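-- pv_equiv track=rewrite | github.com/monokityk/Atu-Parser | Atu number generator.py | generate_custom_number_column_with_2_to_8
-- ===== SOURCE A (Python) =====
-- def generate_custom_number_column_with_2_to_8(start_prefix, start_number, end_number, leading_zeros=3):
--     """
--     Generates a formatted column of numbers with a specified prefix, including numbers ending with 2 through 8.
--
--     Parameters:
--     - start_prefix: The prefix for the starting number.
--     - start_number: The starting value of the range.
--     - end_number: The ending value of the range.
--     - leading_zeros: The number of leading zeros in the formatted numbers.
--
--     Returns:
--     - A string with formatted numbers in a column.
--     """
--     formatted_numbers = []
--
--     for i in range(start_number, end_number + 1):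
--         last_digit = i % 10
--         if 2 <= last_digit <= 8:
--             formatted_number = f"{start_prefix}-{str(i).zfill(leading_zeros)};"
--             formatted_numbers.append(formatted_number)
--
--     formatted_column = "\n".join(formatted_numbers)
--     return formatted_column
-- ===== SOURCE B (Python) =====
-- def generate_custom_number_column_with_2_to_8(start_prefix, start_number, end_number, leading_zeros=3):
--     base = start_number // 10 * 10
--     hits = [t + d
--             for t in range(base, end_number + 1, 10)
--             for d in range(2, 9)
--             if start_number <= t + d <= end_number]
--     lines = [f"{start_prefix}-{str(i).zfill(leading_zeros)};" for i in hits]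
--     return "\n".join(lines)
-- ===== Notes on version B (the rewrite author's own statement) =====
-- stated objective: alternative
-- what changed: B replaces A's single filter-and-accumulate scan (testing i % 10 on every integer) with staged passes: it first generates the matching integers decade by decade (step-10 range, candidate digits 2..8 clipped to [start, end] by comparison, no modulo), then formats that list in a separate mapping pass and joins.
import Mathlib
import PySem

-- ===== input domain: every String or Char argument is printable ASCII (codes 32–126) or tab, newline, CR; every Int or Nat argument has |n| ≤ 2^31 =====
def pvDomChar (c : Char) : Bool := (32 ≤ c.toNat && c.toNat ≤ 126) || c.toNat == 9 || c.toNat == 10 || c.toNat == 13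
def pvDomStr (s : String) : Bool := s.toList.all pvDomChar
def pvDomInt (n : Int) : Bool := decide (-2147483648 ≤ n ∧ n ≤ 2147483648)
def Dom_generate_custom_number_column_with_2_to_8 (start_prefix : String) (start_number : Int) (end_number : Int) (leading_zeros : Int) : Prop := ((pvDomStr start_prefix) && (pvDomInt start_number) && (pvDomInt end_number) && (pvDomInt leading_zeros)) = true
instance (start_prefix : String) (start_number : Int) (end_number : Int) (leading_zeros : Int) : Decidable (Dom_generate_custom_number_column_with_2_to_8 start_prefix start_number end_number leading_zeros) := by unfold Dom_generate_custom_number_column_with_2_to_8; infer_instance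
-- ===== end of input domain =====

-- B builds the matching integers in staged passes — decade-by-decade generation (digits 2..8
-- clipped to [start, end], no modulo), then a separate formatting pass — instead of A's single
-- filter-and-accumulate scan over every integer; same output, different decomposition.

-- the f-string f"{start_prefix}-{str(i).zfill(leading_zeros)};" both programs contain
def pvFmt (start_prefix : String) (leading_zeros : Int) (i : Int) : String :=
  start_prefix ++ "-" ++ PySem.Str.zfill (PySem.Int.toStr i) leading_zeros ++ ";"

-- ===== PORT A =====
def generate_custom_number_column_with_2_to_8 (start_prefix : String) (start_number : Int) (end_number : Int) (leading_zeros : Int) : String :=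
  let formatted_numbers :=
    (PySem.List.pyRange start_number (end_number + 1) 1).foldl
      (fun acc i =>
        let last_digit := PySem.Int.mod i 10
        if 2 ≤ last_digit ∧ last_digit ≤ 8 then
          acc ++ [pvFmt start_prefix leading_zeros i]
        else acc) []
  PySem.Str.join "\n" formatted_numbers

-- ===== PORT B =====
def generate_custom_number_column_with_2_to_8_alt (start_prefix : String) (start_number : Int) (end_number : Int) (leading_zeros : Int) : String :=
  let base := PySem.Int.floordiv start_number 10 * 10
  let hits :=
    (PySem.List.pyRange base (end_number + 1) 10).flatMap
      (fun t =>
        ((PySem.List.pyRange 2 9 1).filter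
            (fun d => decide (start_number ≤ t + d ∧ t + d ≤ end_number))).map
          (fun d => t + d))
  let lines := hits.map (pvFmt start_prefix leading_zeros)
  PySem.Str.join "\n" lines

-- ===== PRECONDITION & SPEC =====
def Spec_generate_custom_number_column_with_2_to_8 (start_prefix : String) (start_number : Int) (end_number : Int) (leading_zeros : Int) (out : String) : Prop := out = generate_custom_number_column_with_2_to_8_alt start_prefix start_number end_number leading_zeros
instance (start_prefix : String) (start_number : Int) (end_number : Int) (leading_zeros : Int) (out : String) : Decidable (Spec_generate_custom_number_column_with_2_to_8 start_prefix start_number end_number leading_zeros out) := by unfold Spec_generate_custom_number_column_with_2_to_8; infer_instance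

-- ===== CLAIM (what is proved, stated in full; the proofs are below) =====
def Claim_equal_generate_custom_number_column_with_2_to_8 : Prop := ∀ (start_prefix : String) (start_number : Int) (end_number : Int) (leading_zeros : Int), Dom_generate_custom_number_column_with_2_to_8 start_prefix start_number end_number leading_zeros → Spec_generate_custom_number_column_with_2_to_8 start_prefix start_number end_number leading_zeros (generate_custom_number_column_with_2_to_8 start_prefix start_number end_number leading_zeros)

-- ===== LEMMAS AND PROOFS =====

-- two strictly increasing Int lists with the same members are equal
lemma pvSortedExt (l1 : List Int) : ∀ l2 : List Int, l1.Pairwise (· < ·) → l2.Pairwise (· < ·) →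
    (∀ x, x ∈ l1 ↔ x ∈ l2) → l1 = l2 := by
  induction l1 with
  | nil =>
    intro l2 _ _ h
    cases l2 with
    | nil => rfl
    | cons b t2 => exact absurd ((h b).mpr (List.mem_cons_self ..)) (by simp)
  | cons a t ih =>
    intro l2 h1 h2 h
    cases l2 with
    | nil => exact absurd ((h a).mp (List.mem_cons_self ..)) (by simp)
    | cons b t2 =>
      have ha2 : a ∈ b :: t2 := (h a).mp (List.mem_cons_self ..)
      have hb1 : b ∈ a :: t := (h b).mpr (List.mem_cons_self ..)
      have hab : a = b := by
        rcases List.mem_cons.mp ha2 with h' | h'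
        · exact h'
        · rcases List.mem_cons.mp hb1 with h'' | h''
          · exact h''.symm
          · have hba := (List.pairwise_cons.mp h2).1 a h'
            have hab := (List.pairwise_cons.mp h1).1 b h''
            omega
      subst hab
      have ht : t = t2 := by
        apply ih t2 (List.pairwise_cons.mp h1).2 (List.pairwise_cons.mp h2).2
        intro x
        constructor
        · intro hx
          rcases List.mem_cons.mp ((h x).mp (List.mem_cons_of_mem _ hx)) with h' | h'
          · have := (List.pairwise_cons.mp h1).1 x hx; omega
          · exact h'
        · intro hx
          rcases List.mem_cons.mp ((h x).mpr (List.mem_cons_of_mem _ hx)) with h' | h'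
          · have := (List.pairwise_cons.mp h2).1 x hx; omega
          · exact h'
      rw [ht]

lemma pvRangeTenNil (a b : Int) (h : b ≤ a) : PySem.List.pyRange a b 10 = [] := by
  rw [PySem.List.pyRange_of_pos a b (by norm_num)]
  rw [if_neg (by omega)]
  simp

lemma pvRangeTenCons (a b : Int) (h : a < b) :
    PySem.List.pyRange a b 10 = a :: PySem.List.pyRange (a + 10) b 10 := by
  rw [PySem.List.pyRange_of_pos a b (by norm_num),
      PySem.List.pyRange_of_pos (a + 10) b (by norm_num)]
  rw [if_pos h]
  by_cases h2 : a + 10 < b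
  · rw [if_pos h2]
    have hn : ((b - a + 10 - 1) / 10).toNat = ((b - (a + 10) + 10 - 1) / 10).toNat + 1 := by omega
    rw [hn, List.range_succ_eq_map, List.map_cons, List.map_map]
    congr 1
    · norm_num
    · apply List.map_congr_left
      intro k _
      simp only [Function.comp_apply]
      push_cast
      ring
  · rw [if_neg h2]
    have hn : ((b - a + 10 - 1) / 10).toNat = 1 := by omega
    rw [hn]
    simp

-- the core list identity: the filtered scan of A equals B's decade generation
lemma pvCore (e : Int) : ∀ (n : Nat) (tb s : Int), (e + 1 - tb).toNat = n → 10 ∣ tb →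
    tb ≤ s → s ≤ tb + 10 →
    (PySem.List.pyRange s (e + 1) 1).filter
        (fun i => decide (2 ≤ PySem.Int.mod i 10 ∧ PySem.Int.mod i 10 ≤ 8))
    = (PySem.List.pyRange tb (e + 1) 10).flatMap
        (fun t => ((PySem.List.pyRange 2 9 1).filter
            (fun d => decide (s ≤ t + d ∧ t + d ≤ e))).map (fun d => t + d)) := by
  intro n
  induction n using Nat.strong_induction_on with
  | _ n ih =>
    intro tb s hn hdvd h1 h2
    by_cases he : e < tb
    · rw [pvRangeTenNil tb (e + 1) (by omega), List.flatMap_nil,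
          PySem.List.pyRange_one_eq_nil (by omega), List.filter_nil]
    · rw [pvRangeTenCons tb (e + 1) (by omega), List.flatMap_cons]
      by_cases hs : e < s
      · rw [PySem.List.pyRange_one_eq_nil (by omega), List.filter_nil]
        have hhead : ((PySem.List.pyRange 2 9 1).filter
            (fun d => decide (s ≤ tb + d ∧ tb + d ≤ e))) = [] := by
          apply List.filter_eq_nil_iff.mpr
          intro d hd
          rw [PySem.List.mem_pyRange_one] at hd
          simp only [decide_eq_true_eq]
          omega
        have hrest : (PySem.List.pyRange (tb + 10) (e + 1) 10).flatMap
            (fun t => ((PySem.List.pyRange 2 9 1).filter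
              (fun d => decide (s ≤ t + d ∧ t + d ≤ e))).map (fun d => t + d)) = [] := by
          apply List.flatMap_eq_nil_iff.mpr
          intro t _
          have hf : ((PySem.List.pyRange 2 9 1).filter
              (fun d => decide (s ≤ t + d ∧ t + d ≤ e))) = [] := by
            apply List.filter_eq_nil_iff.mpr
            intro d hd
            rw [PySem.List.mem_pyRange_one] at hd
            simp only [decide_eq_true_eq]
            omega
          rw [hf, List.map_nil]
        rw [hhead, hrest]
        simp
      · rw [PySem.List.pyRange_one_append s (min (tb + 10) (e + 1)) (e + 1) (by omega) (by omega),
            List.filter_append]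
        have hhead : (PySem.List.pyRange s (min (tb + 10) (e + 1)) 1).filter
              (fun i => decide (2 ≤ PySem.Int.mod i 10 ∧ PySem.Int.mod i 10 ≤ 8))
            = ((PySem.List.pyRange 2 9 1).filter
              (fun d => decide (s ≤ tb + d ∧ tb + d ≤ e))).map (fun d => tb + d) := by
          apply pvSortedExt
          · exact (PySem.List.pairwise_lt_pyRange_one s (min (tb + 10) (e + 1))).filter _
          · exact List.pairwise_map.mpr
              (((PySem.List.pairwise_lt_pyRange_one 2 9).filter _).imp (by omega))
          · intro x
            obtain ⟨k, hk⟩ := hdvd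
            simp only [List.mem_filter, List.mem_map, PySem.List.mem_pyRange_one,
              decide_eq_true_eq,
              PySem.Int.mod_eq_emod_of_pos (show (0 : Int) < 10 by norm_num)]
            constructor
            · rintro ⟨⟨hx1, hx2⟩, hc1, hc2⟩
              exact ⟨x - tb, ⟨⟨by omega, by omega⟩, by omega, by omega⟩, by omega⟩
            · rintro ⟨d, ⟨⟨hd1, hd2⟩, hq1, hq2⟩, rfl⟩
              exact ⟨⟨by omega, by omega⟩, by omega, by omega⟩
        rw [hhead]
        congr 1
        by_cases hc : tb + 10 ≤ e
        · have hm : min (tb + 10) (e + 1) = tb + 10 := by omega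
          rw [hm, ih ((e + 1 - (tb + 10)).toNat) (by omega) (tb + 10) (tb + 10) rfl
              (by omega) (by omega) (by omega)]
          apply List.flatMap_congr
          intro t htm
          rw [PySem.List.mem_pyRange_iff_of_pos (by norm_num)] at htm
          apply congrArg
          apply List.filter_congr
          intro d hd
          rw [PySem.List.mem_pyRange_one] at hd
          simp only [decide_eq_decide]
          constructor <;> intro hx <;> omega
        · have hm : min (tb + 10) (e + 1) = e + 1 := by omega
          rw [hm, PySem.List.pyRange_one_eq_nil (le_refl _), List.filter_nil,
              pvRangeTenNil (tb + 10) (e + 1) (by omega), List.flatMap_nil]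

-- ===== VERDICT (by name: the statement is the Claim_ definition above) =====
theorem generate_custom_number_column_with_2_to_8_spec : Claim_equal_generate_custom_number_column_with_2_to_8 := by
  intro sp s e lz _hdom
  unfold Spec_generate_custom_number_column_with_2_to_8
  simp only [generate_custom_number_column_with_2_to_8,
    generate_custom_number_column_with_2_to_8_alt,
    PySem.List.foldl_append_ite, List.nil_append]
  congr 1
  have hfd : PySem.Int.floordiv s 10 = s / 10 :=
    PySem.Int.floordiv_eq_ediv_of_pos (by norm_num)
  rw [hfd, pvCore e ((e + 1 - s / 10 * 10).toNat) (s / 10 * 10) s rfl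
      ⟨s / 10, mul_comm (s / 10) 10⟩ (by omega) (by omega)]
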